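-- pv_equiv track=rewrite | github.com/Szymon-Glinka/skillsComp | maze/mazeSolver.py | checkIfMoreThanOneStart
-- ===== SOURCE A (Python) =====
-- def checkIfMoreThanOneStart(matrixCheck):
--     counts = {}
--     for rowC in matrixCheck:
--         for letter in rowC:
--             if letter != "#" and letter != " " and letter != "E":
--                 if letter in counts:
--                     counts[letter] += 1
--                 else:
--                     counts[letter] = 1
--                 if counts[letter] > 1:
--                     return True
--     return False
-- ===== SOURCE B (Python) =====
-- def checkIfMoreThanOneStart(matrixCheck):
--     chars = sorted(c for row in matrixCheck for c in row
--                    if c != "#" and c != " " and c != "E")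
--     return any(x == y for x, y in zip(chars, chars[1:]))
-- ===== Notes on version B (the rewrite author's own statement) =====
-- stated objective: alternative
-- what changed: Replaced the incremental dict-counter loop with early exit by sorting the filtered cells and scanning for an equal adjacent pair.
import Mathlib
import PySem

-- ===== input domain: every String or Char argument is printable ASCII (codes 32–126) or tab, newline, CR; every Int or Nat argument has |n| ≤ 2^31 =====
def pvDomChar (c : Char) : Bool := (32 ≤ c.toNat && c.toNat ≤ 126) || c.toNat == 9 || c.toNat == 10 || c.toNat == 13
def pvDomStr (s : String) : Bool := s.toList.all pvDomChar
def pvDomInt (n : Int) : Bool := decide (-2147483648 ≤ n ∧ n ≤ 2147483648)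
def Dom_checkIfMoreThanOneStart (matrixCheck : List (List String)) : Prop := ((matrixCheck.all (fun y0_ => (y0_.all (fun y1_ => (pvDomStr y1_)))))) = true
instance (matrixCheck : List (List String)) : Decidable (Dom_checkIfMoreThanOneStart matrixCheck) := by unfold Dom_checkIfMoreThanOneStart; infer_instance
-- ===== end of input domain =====

-- B replaces A's incremental dict-counter loop with early exit by sorting the
-- filtered cells and scanning for an equal adjacent pair (alternative algorithm).


-- ===== PORT A =====
-- inner 'for letter in rowC' loop; 'none' = the Python 'return True' fired
def pvInnerA (counts : PySem.Dict String Int) : List String → Option (PySem.Dict String Int)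
  | [] => some counts
  | letter :: rest =>
    if letter != "#" && letter != " " && letter != "E" then
      let counts' :=
        if counts.contains letter then counts.insert letter (counts.getD letter 0 + 1)
        else counts.insert letter 1
      if counts'.getD letter 0 > 1 then none
      else pvInnerA counts' rest
    else pvInnerA counts rest

-- outer 'for rowC in matrixCheck' loop
def pvOuterA (counts : PySem.Dict String Int) : List (List String) → Bool
  | [] => false
  | rowC :: rows =>
    match pvInnerA counts rowC with
    | none => true
    | some counts' => pvOuterA counts' rows

def checkIfMoreThanOneStart (matrixCheck : List (List String)) : Bool :=
  pvOuterA PySem.Dict.empty matrixCheck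

-- ===== PORT B =====
-- chars = sorted(<generator>); any(x == y for x, y in zip(chars, chars[1:]))
def checkIfMoreThanOneStart_alt (matrixCheck : List (List String)) : Bool :=
  let chars := PySem.List.sorted
    (matrixCheck.flatMap (fun row => row.filter (fun c => c != "#" && c != " " && c != "E")))
    (fun x => x) false
  (chars.zip (chars.drop 1)).any (fun p => p.1 == p.2)

-- ===== PRECONDITION & SPEC =====
def Spec_checkIfMoreThanOneStart (matrixCheck : List (List String)) (out : Bool) : Prop := out = checkIfMoreThanOneStart_alt matrixCheck
instance (matrixCheck : List (List String)) (out : Bool) : Decidable (Spec_checkIfMoreThanOneStart matrixCheck out) := by unfold Spec_checkIfMoreThanOneStart; infer_instance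

-- ===== CLAIM (what is proved, stated in full; the proofs are below) =====
def Claim_equal_checkIfMoreThanOneStart : Prop := ∀ (matrixCheck : List (List String)), Dom_checkIfMoreThanOneStart matrixCheck → Spec_checkIfMoreThanOneStart matrixCheck (checkIfMoreThanOneStart matrixCheck)

-- ===== LEMMAS AND PROOFS =====

-- abstract duplicate scanner (proof device characterising A's result)
def pvDup (seen : List String) : List String → Bool
  | [] => false
  | c :: cs => if seen.contains c then true else pvDup (seen ++ [c]) cs

def pvP (c : String) : Bool := c != "#" && c != " " && c != "E"

-- invariant tying A's counter dict to the list of distinct cells seen so far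
def pvInv (counts : PySem.Dict String Int) (seen : List String) : Prop :=
  ∀ k, counts.get? k = if k ∈ seen then some 1 else none

lemma pvDup_append (seen xs ys : List String) :
    pvDup seen (xs ++ ys) = (pvDup seen xs || pvDup (seen ++ xs) ys) := by
  induction xs generalizing seen with
  | nil => simp [pvDup]
  | cons c cs ih =>
    simp only [List.cons_append, pvDup]
    by_cases h : c ∈ seen
    · simp [h]
    · simp [h, ih (seen ++ [c])]

lemma pvInnerA_eq {counts : PySem.Dict String Int} {seen : List String} (hinv : pvInv counts seen)
    (row : List String) :
    (pvDup seen (row.filter pvP) = true → pvInnerA counts row = none) ∧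
    (pvDup seen (row.filter pvP) = false →
      ∃ counts', pvInnerA counts row = some counts' ∧ pvInv counts' (seen ++ row.filter pvP)) := by
  induction row generalizing counts seen with
  | nil => exact ⟨by simp [pvDup], fun _ => ⟨counts, by simpa [pvInnerA, List.filter] using hinv⟩⟩
  | cons c cs ih =>
    by_cases hp : pvP c
    · have hpc : (c != "#" && c != " " && c != "E") = true := hp
      by_cases hs : c ∈ seen
      · -- duplicate: A fires 'return True'
        have hget : counts.get? c = some 1 := by rw [hinv c, if_pos hs]
        have hcont : counts.contains c = true := by
          rw [PySem.Dict.contains_eq_isSome_get?, hget]; rfl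
        constructor
        · intro _
          simp only [pvInnerA, hpc, hcont, if_true]
          rw [PySem.Dict.getD, PySem.Dict.get?_insert]
          simp [PySem.Dict.getD, hget]
        · intro hfalse
          exfalso
          simp [List.filter, hp, pvDup, hs] at hfalse
      · -- fresh cell
        have hget : counts.get? c = none := by rw [hinv c, if_neg hs]
        have hcont : counts.contains c = false := by
          rw [PySem.Dict.contains_eq_isSome_get?, hget]; rfl
        have hinv' : pvInv (counts.insert c 1) (seen ++ [c]) := by
          intro k
          rw [PySem.Dict.get?_insert]
          by_cases hk : k = c
          · simp [hk]
          · rw [if_neg hk, hinv k]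
            simp [List.mem_append, hk]
        have step : pvInnerA counts (c :: cs) = pvInnerA (counts.insert c 1) cs := by
          simp only [pvInnerA, hpc, hcont, Bool.false_eq_true, if_false, if_true]
          rw [PySem.Dict.getD, PySem.Dict.get?_insert]
          norm_num
        have hdp : pvDup seen ((c :: cs).filter pvP) = pvDup (seen ++ [c]) (cs.filter pvP) := by
          simp [List.filter, hp, pvDup, hs]
        obtain ⟨ih1, ih2⟩ := ih hinv'
        constructor
        · intro h; rw [step]; exact ih1 (by rwa [hdp] at h)
        · intro h
          obtain ⟨counts', h1, h2⟩ := ih2 (by rwa [hdp] at h)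
          refine ⟨counts', by rw [step]; exact h1, ?_⟩
          have hf : (c :: cs).filter pvP = c :: cs.filter pvP := by
            simp [List.filter, hp]
          rw [hf]
          simpa [List.append_assoc] using h2
    · have hpc : (c != "#" && c != " " && c != "E") = false := by
        simpa [pvP] using hp
      have step : pvInnerA counts (c :: cs) = pvInnerA counts cs := by
        simp [pvInnerA, hpc]
      have hf : (c :: cs).filter pvP = cs.filter pvP := by
        simp [List.filter, hp]
      rw [step, hf]
      exact ih hinv

lemma pvOuterA_eq {counts : PySem.Dict String Int} {seen : List String} (hinv : pvInv counts seen)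
    (rows : List (List String)) :
    pvOuterA counts rows = pvDup seen (rows.flatMap (fun row => row.filter pvP)) := by
  induction rows generalizing counts seen with
  | nil => simp [pvOuterA, pvDup]
  | cons r rs ih =>
    rw [List.flatMap_cons, pvDup_append]
    obtain ⟨h1, h2⟩ := pvInnerA_eq hinv r
    by_cases hd : pvDup seen (r.filter pvP)
    · simp [pvOuterA, h1 hd, hd]
    · obtain ⟨counts', hsome, hinv'⟩ := h2 (by simpa using hd)
      simp only [pvOuterA, hsome, hd, Bool.false_or]
      exact ih hinv'

-- pvDup detects exactly failure of Nodup
lemma pvDup_nodup (seen xs : List String) (hs : seen.Nodup) :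
    pvDup seen xs = false ↔ (seen ++ xs).Nodup := by
  induction xs generalizing seen with
  | nil => simpa [pvDup] using hs
  | cons c cs ih =>
    by_cases h : c ∈ seen
    · constructor
      · intro hfalse; simp [pvDup, h] at hfalse
      · intro hnd
        exact absurd rfl ((List.nodup_append.mp hnd).2.2 c h c List.mem_cons_self)
    · have hs' : (seen ++ [c]).Nodup := by
        simp only [List.nodup_append, List.nodup_singleton, true_and]
        exact ⟨hs, fun a ha b hb => by rw [List.mem_singleton] at hb; subst hb; exact fun he => h (he ▸ ha)⟩
      have := ih (seen ++ [c]) hs'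
      rw [List.append_assoc] at this
      simpa [pvDup, h] using this

-- adjacent-equality scan on a (≤)-pairwise list detects exactly failure of Nodup
lemma pvAdj_nodup (ys : List String) (h : ys.Pairwise (· ≤ ·)) :
    ((ys.zip (ys.drop 1)).any (fun p => p.1 == p.2) = false) ↔ ys.Nodup := by
  induction ys with
  | nil => simp
  | cons c cs ih =>
    cases cs with
    | nil => simp
    | cons d ds =>
      have hp := List.pairwise_cons.mp h
      have hcd : c ≤ d := hp.1 d List.mem_cons_self
      have hcs := hp.2
      have hd := List.pairwise_cons.mp hcs
      have ihcs := ih hcs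
      simp only [List.drop_succ_cons, List.drop_zero, List.zip_cons_cons, List.any_cons,
        Bool.or_eq_false_iff, beq_eq_false_iff_ne, ne_eq] at ihcs ⊢
      constructor
      · rintro ⟨hne, hrest⟩
        have hnd : (d :: ds).Nodup := ihcs.mp hrest
        refine List.nodup_cons.mpr ⟨?_, hnd⟩
        intro hc
        rcases List.mem_cons.mp hc with hcd' | hcds
        · exact hne hcd'
        · exact hne (le_antisymm hcd (hd.1 c hcds))
      · intro hnd
        rcases List.nodup_cons.mp hnd with ⟨hcn, hnd'⟩
        exact ⟨fun he => hcn (he ▸ List.mem_cons_self), ihcs.mpr hnd'⟩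

-- ===== VERDICT (by name: the statement is the Claim_ definition above) =====
theorem checkIfMoreThanOneStart_spec : Claim_equal_checkIfMoreThanOneStart := by
  intro matrixCheck _
  unfold Spec_checkIfMoreThanOneStart
  have hinv : pvInv PySem.Dict.empty [] := by
    intro k; simp [PySem.Dict.empty, PySem.Dict.get?]
  show pvOuterA PySem.Dict.empty matrixCheck = _
  rw [pvOuterA_eq hinv]
  set xs := matrixCheck.flatMap (fun row => row.filter pvP) with hxs
  have hB : checkIfMoreThanOneStart_alt matrixCheck =
      (let chars := PySem.List.sorted xs (fun x => x) false
       (chars.zip (chars.drop 1)).any (fun p => p.1 == p.2)) := rfl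
  rw [hB]
  set chars := PySem.List.sorted xs (fun x => x) false with hchars
  have hperm : chars.Perm xs := PySem.List.sorted_perm xs (fun x => x) false
  have hpw : chars.Pairwise (fun a b => a ≤ b) := by
    simpa using PySem.List.sorted_pairwise xs (fun x => x)
  have h1 : pvDup [] xs = false ↔ xs.Nodup := by
    simpa using pvDup_nodup [] xs List.nodup_nil
  have h2 := pvAdj_nodup chars hpw
  have h3 : chars.Nodup ↔ xs.Nodup := hperm.nodup_iff
  have : pvDup [] xs = false ↔ ((chars.zip (chars.drop 1)).any (fun p => p.1 == p.2)) = false := by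
    rw [h1, h2, h3]
  by_cases hv : pvDup [] xs = false
  · rw [hv, (this.mp hv).symm]
  · have hv' : pvDup [] xs = true := by revert hv; cases pvDup [] xs <;> simp
    rw [hv']
    cases hw : ((chars.zip (chars.drop 1)).any (fun p => p.1 == p.2)) with
    | true => rfl
    | false =>
      rw [this.mpr hw] at hv'
      exact absurd hv' Bool.false_ne_true
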